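-- pv_equiv track=rewrite | github.com/guoxinling/war-timeline-live | update_timeline.py | confidence_for_sources
-- ===== SOURCE A (Python) =====
-- OFFICIAL_DOMAINS = {
--     "idf.il",
--     "gov.il",
--     "state.gov",
--     "defense.gov",
--     "centcom.mil",
--     "whitehouse.gov",
--     "irna.ir",
--     "isna.ir",
--     "mehrnews.com",
--     "mfa.gov.ir",
--     "mod.gov.il",
-- }
--
-- INDEPENDENT_MEDIA_DOMAINS = {
--     "reuters.com",
--     "apnews.com",
--     "bbc.com",
--     "aljazeera.com",
--     "cnn.com",
--     "nytimes.com",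
--     "theguardian.com",
--     "washingtonpost.com",
--     "france24.com",
--     "dw.com",
--     "timesofisrael.com",
--     "haaretz.com",
-- }
--
-- def confidence_for_sources(domains):
--     has_official = any(any(d == od or d.endswith("." + od) for od in OFFICIAL_DOMAINS) for d in domains)
--     has_independent = any(any(d == md or d.endswith("." + md) for md in INDEPENDENT_MEDIA_DOMAINS) for d in domains)
--     if has_official and has_independent:
--         return "A"
--     if has_official:
--         return "B"
--     return "C"
-- ===== SOURCE B (Python) =====
-- OFFICIAL_DOMAINS = {
--     "idf.il",
--     "gov.il",
--     "state.gov",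
--     "defense.gov",
--     "centcom.mil",
--     "whitehouse.gov",
--     "irna.ir",
--     "isna.ir",
--     "mehrnews.com",
--     "mfa.gov.ir",
--     "mod.gov.il",
-- }
--
-- INDEPENDENT_MEDIA_DOMAINS = {
--     "reuters.com",
--     "apnews.com",
--     "bbc.com",
--     "aljazeera.com",
--     "cnn.com",
--     "nytimes.com",
--     "theguardian.com",
--     "washingtonpost.com",
--     "france24.com",
--     "dw.com",
--     "timesofisrael.com",
--     "haaretz.com",
-- }
--
--
-- def _dotted_suffixes(d):
--     # the whole string, plus every tail starting just after a '.'
--     out = [d]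
--     for i, c in enumerate(d):
--         if c == ".":
--             out.append(d[i + 1:])
--     return out
--
--
-- def confidence_for_sources(domains):
--     has_official = False
--     has_independent = False
--     for d in domains:
--         for s in _dotted_suffixes(d):
--             has_official = has_official or s in OFFICIAL_DOMAINS
--             has_independent = has_independent or s in INDEPENDENT_MEDIA_DOMAINS
--     if has_official and has_independent:
--         return "A"
--     if has_official:
--         return "B"
--     return "C"
-- ===== Notes on version B (the rewrite author's own statement) =====
-- stated objective: idiomatic
-- what changed: Instead of two any-passes testing each domain with endswith against every set member, B makes one pass over the domains, generates each domain's dotted suffixes (whole string plus each tail after a '.') and tests those by direct set membership, accumulating both flags together.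
import Mathlib
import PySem

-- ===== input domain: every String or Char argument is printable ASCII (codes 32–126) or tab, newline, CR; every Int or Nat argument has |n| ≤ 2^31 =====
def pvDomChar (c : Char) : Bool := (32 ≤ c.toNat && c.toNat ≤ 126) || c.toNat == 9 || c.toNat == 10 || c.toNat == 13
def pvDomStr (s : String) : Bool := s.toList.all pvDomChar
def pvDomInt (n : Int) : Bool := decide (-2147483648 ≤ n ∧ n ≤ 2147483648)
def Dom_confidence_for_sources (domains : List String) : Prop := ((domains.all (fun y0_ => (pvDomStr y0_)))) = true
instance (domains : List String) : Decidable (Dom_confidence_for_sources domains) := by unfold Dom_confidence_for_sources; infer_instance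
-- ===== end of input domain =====

-- B replaces the per-domain endswith scan over the two sets by membership tests of the
-- domain's own dotted suffixes, accumulating both flags in a single pass (idiomatic).


-- ===== PORT A =====
def OFFICIAL_DOMAINS : List String :=
  ["idf.il", "gov.il", "state.gov", "defense.gov", "centcom.mil", "whitehouse.gov",
   "irna.ir", "isna.ir", "mehrnews.com", "mfa.gov.ir", "mod.gov.il"]

def INDEPENDENT_MEDIA_DOMAINS : List String :=
  ["reuters.com", "apnews.com", "bbc.com", "aljazeera.com", "cnn.com", "nytimes.com",
   "theguardian.com", "washingtonpost.com", "france24.com", "dw.com",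
   "timesofisrael.com", "haaretz.com"]

def confidence_for_sources (domains : List String) : String :=
  let has_official :=
    domains.any (fun d => OFFICIAL_DOMAINS.any (fun od => d == od || PySem.Str.endswith d ("." ++ od)))
  let has_independent :=
    domains.any (fun d => INDEPENDENT_MEDIA_DOMAINS.any (fun md => d == md || PySem.Str.endswith d ("." ++ md)))
  if has_official && has_independent then "A"
  else if has_official then "B"
  else "C"

-- ===== PORT B =====
-- tails of d starting just after a '.' (char scan, as in Source B's loop)
def pvDotTails : List Char → List (List Char)
  | [] => []
  | c :: rest => if c = '.' then rest :: pvDotTails rest else pvDotTails rest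

def pvDottedSuffixes (d : String) : List String :=
  d :: (pvDotTails d.toList).map (fun l => String.ofList l)

def confidence_for_sources_alt (domains : List String) : String :=
  let p : Bool × Bool :=
    domains.foldl (fun st d =>
      (pvDottedSuffixes d).foldl (fun st s =>
        (st.1 || OFFICIAL_DOMAINS.contains s, st.2 || INDEPENDENT_MEDIA_DOMAINS.contains s)) st)
      (false, false)
  if p.1 && p.2 then "A"
  else if p.1 then "B"
  else "C"

-- ===== PRECONDITION & SPEC =====
def Spec_confidence_for_sources (domains : List String) (out : String) : Prop := out = confidence_for_sources_alt domains
instance (domains : List String) (out : String) : Decidable (Spec_confidence_for_sources domains out) := by unfold Spec_confidence_for_sources; infer_instance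

-- ===== CLAIM (what is proved, stated in full; the proofs are below) =====
def Claim_equal_confidence_for_sources : Prop := ∀ (domains : List String), Dom_confidence_for_sources domains → Spec_confidence_for_sources domains (confidence_for_sources domains)

-- ===== LEMMAS AND PROOFS =====

theorem mem_pvDotTails_iff (l p : List Char) : p ∈ pvDotTails l ↔ ('.' :: p) <:+ l := by
  induction l with
  | nil => simp [pvDotTails]
  | cons c rest ih =>
    simp only [pvDotTails]
    rw [List.suffix_cons_iff]
    split_ifs with hc
    · subst hc
      simp [ih]
    · simp only at *
      constructor
      · intro h; exact Or.inr (ih.mp h)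
      · rintro (h | h)
        · exact absurd (List.cons_eq_cons.mp h).1 (Ne.symm hc)
        · exact ih.mpr h

theorem mem_pvDottedSuffixes_iff (d s : String) :
    s ∈ pvDottedSuffixes d ↔ d = s ∨ ('.' :: s.toList) <:+ d.toList := by
  simp only [pvDottedSuffixes, List.mem_cons, List.mem_map]
  constructor
  · rintro (h | ⟨l, hl, rfl⟩)
    · exact Or.inl h.symm
    · exact Or.inr (by simpa [String.toList_ofList] using (mem_pvDotTails_iff _ _).mp hl)
  · rintro (h | h)
    · exact Or.inl h.symm
    · exact Or.inr ⟨s.toList, (mem_pvDotTails_iff _ _).mpr h, by simp [String.ofList_toList]⟩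

-- A's per-domain test for a candidate set equals B's suffix-membership test
theorem per_domain_eq (S : List String) (d : String) :
    (S.any (fun od => d == od || PySem.Str.endswith d ("." ++ od)))
      = ((pvDottedSuffixes d).any (fun s => S.contains s)) := by
  rw [Bool.eq_iff_iff]
  simp only [List.any_eq_true, Bool.or_eq_true, beq_iff_eq, List.contains_eq_mem,
    decide_eq_true_eq]
  constructor
  · rintro ⟨od, hod, h | h⟩
    · exact ⟨od, (mem_pvDottedSuffixes_iff _ _).mpr (Or.inl h), hod⟩
    · refine ⟨od, (mem_pvDottedSuffixes_iff _ _).mpr (Or.inr ?_), hod⟩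
      have := PySem.Str.endswith_eq d ("." ++ od)
      rw [this] at h
      have := (PySem.Chars.endswith_iff _ _).mp h
      simpa using this
  · rintro ⟨s, hs, hS⟩
    refine ⟨s, hS, ?_⟩
    rcases (mem_pvDottedSuffixes_iff _ _).mp hs with h | h
    · exact Or.inl h
    · refine Or.inr ?_
      rw [PySem.Str.endswith_eq]
      exact (PySem.Chars.endswith_iff _ _).mpr (by simpa using h)

-- fold with pairwise or-accumulation computes the two `any`s
theorem foldl_or_pair {α : Type} (f g : α → Bool) (l : List α) (st : Bool × Bool) :
    l.foldl (fun st x => (st.1 || f x, st.2 || g x)) st = (st.1 || l.any f, st.2 || l.any g) := by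
  induction l generalizing st with
  | nil => simp
  | cons a t ih => simp [ih, Bool.or_assoc]

theorem alt_pair_eq (domains : List String) :
    domains.foldl (fun st d =>
      (pvDottedSuffixes d).foldl (fun st s =>
        (st.1 || OFFICIAL_DOMAINS.contains s, st.2 || INDEPENDENT_MEDIA_DOMAINS.contains s)) st)
      (false, false)
    = (domains.any (fun d => (pvDottedSuffixes d).any (fun s => OFFICIAL_DOMAINS.contains s)),
       domains.any (fun d => (pvDottedSuffixes d).any (fun s => INDEPENDENT_MEDIA_DOMAINS.contains s))) := by
  have h1 : (fun (st : Bool × Bool) d =>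
      (pvDottedSuffixes d).foldl (fun st s =>
        (st.1 || OFFICIAL_DOMAINS.contains s, st.2 || INDEPENDENT_MEDIA_DOMAINS.contains s)) st)
      = (fun (st : Bool × Bool) d =>
          (st.1 || (pvDottedSuffixes d).any (fun s => OFFICIAL_DOMAINS.contains s),
           st.2 || (pvDottedSuffixes d).any (fun s => INDEPENDENT_MEDIA_DOMAINS.contains s))) := by
    funext st d; exact foldl_or_pair _ _ _ st
  rw [h1, foldl_or_pair]; simp

-- ===== VERDICT (by name: the statement is the Claim_ definition above) =====
theorem confidence_for_sources_spec : Claim_equal_confidence_for_sources := by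
  intro domains _
  show confidence_for_sources domains = confidence_for_sources_alt domains
  unfold confidence_for_sources confidence_for_sources_alt
  rw [alt_pair_eq]
  simp only [per_domain_eq]
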